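-- pv_equiv track=rewrite | github.com/Lyresto/formal_specification | template/test_code.py | print_output_for_go
-- ===== SOURCE A (Python) =====
-- go_atom_types = ['int', 'float32', 'float64', 'string', 'bool']
--
-- def spaces(length):
--     return ''.join([' '] * length)
--
-- def get_item_type_for_go(ori_type):
--     return ori_type[ori_type.find(']') + 1:].strip()
--
-- def print_output_for_go(ret_type: str, depth=0):
--     function = f'func PrintOutput{depth}(output {ret_type}, index int) {{\n'
--     if depth == 0:
--         function += spaces(4) + 'fmt.Printf("\\n[SOLUTION OUTPUT %v] ", index)\n'
--     if ret_type in go_atom_types: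
--         if ret_type == 'string':
--             function += spaces(4) + 'fmt.Printf("\\\"%v\\\"", output)\n'
--         else:
--             function += spaces(4) + 'fmt.Printf("%v", output)\n'
--         item_type = None
--     elif ret_type.startswith('['):
--         item_type = get_item_type_for_go(ret_type)
--         function += spaces(4) + 'fmt.Printf("[")\n'
--         function += spaces(4) + f'for i, item := range output {{\n'
--         function += spaces(8) + f'PrintOutput{depth + 1}(item, -1)\n'
--         function += spaces(8) + 'if i != len(output) - 1 {\n'
--         function += spaces(12) + 'fmt.Printf(", ")\n'
--         function += spaces(8) + '}\n'
--         function += spaces(4) + '}\n'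
--         function += spaces(4) + 'fmt.Printf("]")\n'
--     else:
--         raise NotImplementedError()
--     if depth == 0:
--         function += spaces(4) + 'fmt.Printf("\\n")\n'
--     function += '}\n\n\n'
--     if item_type is not None:
--         function = print_output_for_go(item_type, depth + 1) + function
--     return function
-- ===== SOURCE B (Python) =====
-- # B: iterative decomposition — walk the type chain first, then emit each block, join deepest-first.
-- go_atom_types = ['int', 'float32', 'float64', 'string', 'bool']
--
--
-- def get_item_type_for_go(ori_type):
--     return ori_type[ori_type.find(']') + 1:].strip()
--
--
-- def _block_for_go(t, d):
--     lines = [f'func PrintOutput{d}(output {t}, index int) {{\n']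
--     if d == 0:
--         lines.append('    fmt.Printf("\\n[SOLUTION OUTPUT %v] ", index)\n')
--     if t in go_atom_types:
--         if t == 'string':
--             lines.append('    fmt.Printf("\\\"%v\\\"", output)\n')
--         else:
--             lines.append('    fmt.Printf("%v", output)\n')
--     else:
--         lines.append('    fmt.Printf("[")\n')
--         lines.append('    for i, item := range output {\n')
--         lines.append(f'        PrintOutput{d + 1}(item, -1)\n')
--         lines.append('        if i != len(output) - 1 {\n')
--         lines.append('            fmt.Printf(", ")\n')
--         lines.append('        }\n')
--         lines.append('    }\n')
--         lines.append('    fmt.Printf("]")\n')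
--     if d == 0:
--         lines.append('    fmt.Printf("\\n")\n')
--     lines.append('}\n\n\n')
--     return ''.join(lines)
--
--
-- def print_output_for_go(ret_type: str, depth=0):
--     chain = []
--     t, d = ret_type, depth
--     while t not in go_atom_types:
--         if not (t.startswith('[') and ']' in t):
--             raise NotImplementedError()
--         chain.append((t, d))
--         t, d = get_item_type_for_go(t), d + 1
--     chain.append((t, d))
--     return ''.join(_block_for_go(t, d) for t, d in reversed(chain))
-- ===== Notes on version B (the rewrite author's own statement) =====
-- stated objective: alternative
-- what changed: Replaces A's prepend-on-return recursion by an iterative walk that first collects the (type, depth) chain, a separate per-level block builder, and a single deepest-first join.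
import Mathlib
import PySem

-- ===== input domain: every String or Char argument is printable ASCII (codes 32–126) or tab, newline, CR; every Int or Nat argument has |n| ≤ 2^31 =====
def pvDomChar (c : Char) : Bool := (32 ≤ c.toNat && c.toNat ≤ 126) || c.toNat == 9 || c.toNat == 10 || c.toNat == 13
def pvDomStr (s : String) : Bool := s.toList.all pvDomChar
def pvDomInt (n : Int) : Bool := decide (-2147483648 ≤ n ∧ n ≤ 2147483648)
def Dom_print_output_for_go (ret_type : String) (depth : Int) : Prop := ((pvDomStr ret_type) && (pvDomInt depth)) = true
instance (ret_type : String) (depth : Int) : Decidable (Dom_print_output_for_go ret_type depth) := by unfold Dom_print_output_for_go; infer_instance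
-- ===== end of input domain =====

-- B re-decomposes A's recursion: an iterative walk collecting the (type, depth) chain, a per-level
-- block builder, and a deepest-first join; same return value wherever A returns (objective: alternative).

-- ===== PORT A =====
-- go_atom_types (as char lists; ports work on List Char and wrap, per PySem convention)
def goAtoms : List (List Char) := ["int".toList, "float32".toList, "float64".toList, "string".toList, "bool".toList]

-- spaces(length) = ''.join([' '] * length)
def spacesA (n : Nat) : List Char := (List.replicate n [' ']).flatten

-- get_item_type_for_go(ori_type) = ori_type[ori_type.find(']') + 1:].strip()
def getItemTypeChars (t : List Char) : List Char :=
  PySem.Chars.strip (PySem.List.slice t (some (PySem.Chars.find t "]".toList + 1)) none)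

-- literal transliteration of A's recursion; fuel (length+1, enough under Pre_) only makes it total,
-- [] stands for the NotImplementedError / unbounded-recursion paths, which Pre_ excludes
def goAChars : Nat → List Char → Int → List Char
  | 0, _, _ => []
  | fuel + 1, rt, depth =>
    let f := "func PrintOutput".toList ++ PySem.Int.toChars depth ++ "(output ".toList ++ rt ++ ", index int) {\n".toList
    let f := if depth == 0 then f ++ spacesA 4 ++ "fmt.Printf(\"\\n[SOLUTION OUTPUT %v] \", index)\n".toList else f
    if goAtoms.contains rt then
      let f := if rt = "string".toList then
          f ++ spacesA 4 ++ "fmt.Printf(\"\\\"%v\\\"\", output)\n".toList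
        else
          f ++ spacesA 4 ++ "fmt.Printf(\"%v\", output)\n".toList
      let f := if depth == 0 then f ++ spacesA 4 ++ "fmt.Printf(\"\\n\")\n".toList else f
      f ++ "}\n\n\n".toList
    else if PySem.Chars.startswith rt "[".toList then
      let item := getItemTypeChars rt
      let f := f ++ spacesA 4 ++ "fmt.Printf(\"[\")\n".toList
        ++ spacesA 4 ++ "for i, item := range output {\n".toList
        ++ spacesA 8 ++ "PrintOutput".toList ++ PySem.Int.toChars (depth + 1) ++ "(item, -1)\n".toList
        ++ spacesA 8 ++ "if i != len(output) - 1 {\n".toList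
        ++ spacesA 12 ++ "fmt.Printf(\", \")\n".toList
        ++ spacesA 8 ++ "}\n".toList
        ++ spacesA 4 ++ "}\n".toList
        ++ spacesA 4 ++ "fmt.Printf(\"]\")\n".toList
      let f := if depth == 0 then f ++ spacesA 4 ++ "fmt.Printf(\"\\n\")\n".toList else f
      goAChars fuel item (depth + 1) ++ (f ++ "}\n\n\n".toList)
    else []

def print_output_for_go (ret_type : String) (depth : Int) : String :=
  String.ofList (goAChars (ret_type.toList.length + 1) ret_type.toList depth)

-- ===== PORT B =====
-- _block_for_go(t, d): one PrintOutput{d} block, built as a list of lines then joined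
def blockB (t : List Char) (d : Int) : List Char :=
  let lines := ["func PrintOutput".toList ++ PySem.Int.toChars d ++ "(output ".toList ++ t ++ ", index int) {\n".toList]
  let lines := if d == 0 then lines ++ ["    fmt.Printf(\"\\n[SOLUTION OUTPUT %v] \", index)\n".toList] else lines
  let lines :=
    if goAtoms.contains t then
      if t = "string".toList then lines ++ ["    fmt.Printf(\"\\\"%v\\\"\", output)\n".toList]
      else lines ++ ["    fmt.Printf(\"%v\", output)\n".toList]
    else
      lines ++ ["    fmt.Printf(\"[\")\n".toList,
        "    for i, item := range output {\n".toList,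
        "        PrintOutput".toList ++ PySem.Int.toChars (d + 1) ++ "(item, -1)\n".toList,
        "        if i != len(output) - 1 {\n".toList,
        "            fmt.Printf(\", \")\n".toList,
        "        }\n".toList,
        "    }\n".toList,
        "    fmt.Printf(\"]\")\n".toList]
  let lines := if d == 0 then lines ++ ["    fmt.Printf(\"\\n\")\n".toList] else lines
  (lines ++ ["}\n\n\n".toList]).flatten

-- the while loop collecting the chain of (type, depth); none = NotImplementedError (outside Pre_)
def chainB : Nat → List Char → Int → Option (List (List Char × Int))
  | 0, _, _ => none
  | fuel + 1, t, d =>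
    if goAtoms.contains t then some [(t, d)]
    else if PySem.Chars.startswith t "[".toList && PySem.Chars.isIn "]".toList t then
      match chainB fuel (getItemTypeChars t) (d + 1) with
      | some l => some ((t, d) :: l)
      | none => none
    else none

-- '' stands for B's NotImplementedError path, which Pre_ excludes
def print_output_for_go_alt (ret_type : String) (depth : Int) : String :=
  match chainB (ret_type.toList.length + 1) ret_type.toList depth with
  | some l => String.ofList ((l.map (fun p => blockB p.1 p.2)).reverse.flatten)
  | none => ""

-- ===== PRECONDITION & SPEC =====
-- Pre_: ret_type is a well-formed Go type by the grammar  type ::= atom | '[' … ']' type  (with the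
-- item obtained exactly as get_item_type_for_go does) — exactly where the Python A returns normally;
-- elsewhere A raises NotImplementedError or RecursionError.
inductive GoType : List Char → Prop
  | atom (t : List Char) (h : goAtoms.contains t = true) : GoType t
  | arr (t : List Char) (h1 : PySem.Chars.startswith t "[".toList = true)
      (h2 : PySem.Chars.isIn "]".toList t = true)
      (h3 : GoType (getItemTypeChars t)) : GoType t

def Pre_print_output_for_go (ret_type : String) (depth : Int) : Prop :=
  GoType ret_type.toList

lemma getItemType_len_lt (t : List Char) (h : PySem.Chars.isIn "]".toList t = true) :
    (getItemTypeChars t).length < t.length := by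
  have hinf : "]".toList <:+: t := (PySem.Chars.isIn_iff_infix _ _).mp h
  have hfind : 0 ≤ PySem.Chars.find t "]".toList := (PySem.Chars.find_nonneg_iff _ _).mpr hinf
  have hne : t ≠ [] := by
    rintro rfl
    simpa using hinf.sublist.length_le
  unfold getItemTypeChars
  have hdrop : PySem.List.slice t (some (PySem.Chars.find t "]".toList + 1)) none
      = t.drop (PySem.Chars.find t "]".toList + 1).toNat :=
    PySem.List.slice_from t (by omega)
  rw [hdrop]
  have h1 : 1 ≤ (PySem.Chars.find t "]".toList + 1).toNat := by omega
  have hlen : (t.drop (PySem.Chars.find t "]".toList + 1).toNat).length < t.length := by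
    have := List.length_drop (l := t) (i := (PySem.Chars.find t "]".toList + 1).toNat)
    have h0 : 0 < t.length := List.length_pos_iff.mpr hne
    omega
  calc (PySem.Chars.strip (t.drop (PySem.Chars.find t "]".toList + 1).toNat)).length
      ≤ (t.drop (PySem.Chars.find t "]".toList + 1).toNat).length := by
        unfold PySem.Chars.strip PySem.Chars.rstrip PySem.Chars.lstrip
        calc ((List.dropWhile PySem.Chars.isspace
                (List.dropWhile PySem.Chars.isspace _).reverse).reverse).length
            ≤ _ := by
              simpa using List.length_dropWhile_le (p := PySem.Chars.isspace)
                (l := (List.dropWhile PySem.Chars.isspace (t.drop (PySem.Chars.find t "]".toList + 1).toNat)).reverse)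
          _ ≤ _ := List.length_dropWhile_le _ _
    _ < t.length := hlen

-- decidability of the grammar, via a structurally recursive check (length+1 bounds the peel count)
def chkGo : Nat → List Char → Bool
  | 0, _ => false
  | fuel + 1, t =>
    goAtoms.contains t ||
      (PySem.Chars.startswith t "[".toList && PySem.Chars.isIn "]".toList t
        && chkGo fuel (getItemTypeChars t))

lemma goType_of_chk : ∀ (fuel : Nat) (t : List Char), chkGo fuel t = true → GoType t := by
  intro fuel
  induction fuel with
  | zero => intro t h; simp [chkGo] at h
  | succ n ih =>
    intro t h
    rcases Bool.or_eq_true_iff.mp h with h | h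
    · exact GoType.atom t h
    · rcases Bool.and_eq_true_iff.mp h with ⟨h12, h3⟩
      rcases Bool.and_eq_true_iff.mp h12 with ⟨h1, h2⟩
      exact GoType.arr t h1 h2 (ih _ h3)

lemma chk_of_goType : ∀ (t : List Char), GoType t → ∀ (fuel : Nat), t.length < fuel → chkGo fuel t = true := by
  intro t hg
  induction hg with
  | atom t h =>
    intro fuel hf
    cases fuel with
    | zero => omega
    | succ n => simp only [chkGo, h, Bool.true_or]
  | arr t h1 h2 h3 ih =>
    intro fuel hf
    cases fuel with
    | zero => omega
    | succ n =>
      have := getItemType_len_lt t h2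
      simp only [chkGo, h1, h2, ih n (by omega), Bool.and_self, Bool.or_true]

instance (ret_type : String) (depth : Int) : Decidable (Pre_print_output_for_go ret_type depth) :=
  decidable_of_iff (chkGo (ret_type.toList.length + 1) ret_type.toList = true)
    ⟨goType_of_chk _ _, fun h => chk_of_goType _ h _ (by omega)⟩

def pvWitness_print_output_for_go : String × Int := ("[][]string", 0)

def Spec_print_output_for_go (ret_type : String) (depth : Int) (out : String) : Prop := out = print_output_for_go_alt ret_type depth
instance (ret_type : String) (depth : Int) (out : String) : Decidable (Spec_print_output_for_go ret_type depth out) := by unfold Spec_print_output_for_go; infer_instance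

-- ===== CLAIM (what is proved, stated in full; the proofs are below) =====
def Claim_equal_print_output_for_go : Prop := ∀ (ret_type : String) (depth : Int), Dom_print_output_for_go ret_type depth → Pre_print_output_for_go ret_type depth → Spec_print_output_for_go ret_type depth (print_output_for_go ret_type depth)

-- ===== LEMMAS AND PROOFS =====
lemma goA_atom (n : Nat) (t : List Char) (d : Int) (hat : goAtoms.contains t = true) :
    goAChars (n + 1) t d = blockB t d := by
  simp only [goAChars, blockB, hat, if_true]
  split_ifs <;>
    (simp only [List.cons_append, List.nil_append, List.append_nil, List.flatten_cons,
      List.flatten_nil, List.append_assoc]) <;> rfl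

lemma goA_arr (n : Nat) (t : List Char) (d : Int) (hat : goAtoms.contains t = false)
    (hsw : PySem.Chars.startswith t "[".toList = true) :
    goAChars (n + 1) t d = goAChars n (getItemTypeChars t) (d + 1) ++ blockB t d := by
  simp only [goAChars, blockB, hat, hsw, if_true, Bool.false_eq_true, if_false]
  split_ifs <;>
    (simp only [List.cons_append, List.nil_append, List.append_nil, List.flatten_cons,
      List.flatten_nil, List.append_assoc]) <;> rfl

lemma main_lemma : ∀ (fuel : Nat) (t : List Char) (d : Int), GoType t → t.length < fuel →
    ∃ l, chainB fuel t d = some l ∧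
      goAChars fuel t d = (l.map (fun p => blockB p.1 p.2)).reverse.flatten := by
  intro fuel
  induction fuel with
  | zero => intro t d _ h; omega
  | succ n ih =>
    intro t d hv hlen
    by_cases hat : goAtoms.contains t = true
    · refine ⟨[(t, d)], ?_, ?_⟩
      · simp only [chainB, hat, if_true]
      · rw [goA_atom n t d hat]
        simp
    · rw [Bool.not_eq_true] at hat
      cases hv with
      | atom t h => rw [h] at hat; cases hat
      | arr t h1 h2 h3 =>
        have hlt := getItemType_len_lt t h2
        obtain ⟨l, hc, hg⟩ := ih (getItemTypeChars t) (d + 1) h3 (by omega)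
        refine ⟨(t, d) :: l, ?_, ?_⟩
        · simp only [chainB, hat, Bool.false_eq_true, if_false, h1, h2, Bool.and_self, if_true, hc]
        · rw [goA_arr n t d hat h1, hg]
          simp [List.flatten_append]

-- ===== VERDICT (by name: the statement is the Claim_ definition above) =====
theorem print_output_for_go_spec : Claim_equal_print_output_for_go := by
  intro ret_type depth _ hpre
  unfold Spec_print_output_for_go print_output_for_go print_output_for_go_alt
  obtain ⟨l, hc, hg⟩ := main_lemma (ret_type.toList.length + 1) ret_type.toList depth hpre (by omega)
  rw [hc, hg]
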